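-- pv_equiv track=rewrite | github.com/jaronjlee/algorithms | coding_challenges/better.com.py/coding_challenge.py | solution
-- ===== SOURCE A (Python) =====
-- def solution(S, K):
--     days = ["Mon", "Tue", "Wed", "Thu", "Fri", "Sat", "Sun"]
--     startIdx = None
--     for i in range(0, len(days)):
--         if S == days[i]:
--             startIdx = i
--             break
--
--     steps = K % 7
--     currentIdx = startIdx
--     while steps > 0:
--         currentIdx += 1
--         if currentIdx == 7:
--             currentIdx = 0
--         steps -= 1
--
--     return days[currentIdx]
-- ===== SOURCE B (Python) =====
-- def solution(S, K):
--     days = ["Mon", "Tue", "Wed", "Thu", "Fri", "Sat", "Sun"]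
--     return days[(days.index(S) + K) % 7]
-- ===== Notes on version B (the rewrite author's own statement) =====
-- stated objective: simpler
-- what changed: Replaces the step-by-step while loop over K%7 increments with a single closed-form modular index (days.index(S)+K)%7.
-- outside the precondition, e.g. on solution('Xyz', 3): A raises TypeError, B raises ValueError
import Mathlib
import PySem

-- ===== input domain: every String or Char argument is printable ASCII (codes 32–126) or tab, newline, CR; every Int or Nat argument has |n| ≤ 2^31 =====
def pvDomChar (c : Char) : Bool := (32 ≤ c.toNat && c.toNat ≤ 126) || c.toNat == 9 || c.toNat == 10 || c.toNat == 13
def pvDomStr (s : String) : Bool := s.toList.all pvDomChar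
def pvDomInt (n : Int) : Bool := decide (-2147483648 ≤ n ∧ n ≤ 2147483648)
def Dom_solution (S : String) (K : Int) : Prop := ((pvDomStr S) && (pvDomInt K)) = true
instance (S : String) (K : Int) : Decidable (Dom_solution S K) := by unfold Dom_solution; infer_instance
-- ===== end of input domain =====

-- B replaces A's step-by-step while loop with a closed-form modular index; return values proved equal on valid day names.

-- ===== PORT A =====
-- the for-loop with break: scan the list, carrying the running index
def scanA (S : String) : List String → Int → Option Int
  | [], _ => none
  | d :: rest, i => if S = d then some i else scanA S rest (i + 1)

-- the while loop: 'steps' many increments with wraparound at 7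
def loopA (cur : Int) : Nat → Int
  | 0 => cur
  | n + 1 => loopA (if cur + 1 = 7 then 0 else cur + 1) n

def solution (S : String) (K : Int) : String :=
  let days : List String := ["Mon", "Tue", "Wed", "Thu", "Fri", "Sat", "Sun"]
  let startIdx := scanA S days 0
  let steps := PySem.Int.mod K 7
  match startIdx with
  | none => ""  -- Python raises TypeError here (None index / None + 1); excluded by Pre_solution
  | some c => ((PySem.List.pyGet? days (loopA c steps.toNat)).getD "")

-- ===== PORT B =====
def solution_alt (S : String) (K : Int) : String :=
  let days : List String := ["Mon", "Tue", "Wed", "Thu", "Fri", "Sat", "Sun"]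
  match PySem.List.index? days S with
  | none => ""  -- Python raises ValueError here; excluded by Pre_solution
  | some i => (PySem.List.pyGet? days (PySem.Int.mod ((i : Int) + K) 7)).getD ""

-- ===== PRECONDITION & SPEC =====
-- Pre_: S must be one of the seven day names; otherwise A raises (TypeError on the None index).
def Pre_solution (S : String) (K : Int) : Prop :=
  S ∈ (["Mon", "Tue", "Wed", "Thu", "Fri", "Sat", "Sun"] : List String)
instance (S : String) (K : Int) : Decidable (Pre_solution S K) := by unfold Pre_solution; infer_instance
def pvWitness_solution : String × Int := ("Wed", 23)
def Spec_solution (S : String) (K : Int) (out : String) : Prop := out = solution_alt S K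
instance (S : String) (K : Int) (out : String) : Decidable (Spec_solution S K out) := by unfold Spec_solution; infer_instance

-- ===== CLAIM (what is proved, stated in full; the proofs are below) =====
def Claim_equal_solution : Prop := ∀ (S : String) (K : Int), Dom_solution S K → Pre_solution S K → Spec_solution S K (solution S K)

-- ===== LEMMAS AND PROOFS =====

-- the while loop computes addition mod 7
theorem loopA_eq (n : Nat) : ∀ cur : Int, 0 ≤ cur → cur < 7 → loopA cur n = (cur + n) % 7 := by
  induction n with
  | zero => intro cur h0 h7; simp [loopA]; omega
  | succ m ih =>
    intro cur h0 h7
    simp only [loopA]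
    by_cases h : cur + 1 = 7
    · rw [if_pos h, ih 0 (by omega) (by omega)]; omega
    · rw [if_neg h, ih (cur + 1) (by omega) (by omega)]; omega

theorem solution_eq_alt (S : String) (K : Int) (h : Pre_solution S K) :
    solution S K = solution_alt S K := by
  have hm : PySem.Int.mod K 7 = K % 7 := PySem.Int.mod_eq_emod_of_pos (by omega)
  have hnn : 0 ≤ K % 7 := Int.emod_nonneg K (by omega)
  have hlt : K % 7 < 7 := Int.emod_lt_of_pos K (by omega)
  have key : ∀ c : Int, 0 ≤ c → c < 7 →
      loopA c (K % 7).toNat = (c + K) % 7 := by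
    intro c h0 h7
    rw [loopA_eq _ c h0 h7]
    omega
  unfold Pre_solution at h
  simp only [List.mem_cons, List.not_mem_nil, or_false] at h
  rcases h with rfl | rfl | rfl | rfl | rfl | rfl | rfl <;>
    simp [solution, solution_alt, scanA, PySem.List.index?_eq_idxOf?, List.idxOf?, List.findIdx?, List.findIdx?.go, hm,
      key 0 (by omega) (by omega), key 1 (by omega) (by omega), key 2 (by omega) (by omega),
      key 3 (by omega) (by omega), key 4 (by omega) (by omega), key 5 (by omega) (by omega),
      key 6 (by omega) (by omega)]

-- ===== VERDICT (by name: the statement is the Claim_ definition above) =====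
theorem solution_spec : Claim_equal_solution := by
  intro S K _ hpre
  exact solution_eq_alt S K hpre
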